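-- pv_equiv track=rewrite | github.com/SallyAlsfadi/NLP-based-Quality-Attributes-Extraction-and-Prioritization-Framework | src/prioritizer.py | prioritize_by_role_weighted_frequency
-- ===== SOURCE A (Python) =====
-- from collections import defaultdict
--
-- def prioritize_by_role_weighted_frequency(story_tuples):
--     """
--     Input: list of (role, [attributes]) tuples
--     Output: dict of {attribute: weighted score}
--     """
--     # Count how often each role appears
--     role_counts = defaultdict(int)
--     attr_role_matrix = defaultdict(lambda: defaultdict(int))
--
--     for role, attrs in story_tuples:
--         role_counts[role] += 1
--         for attr in attrs:
--             attr_role_matrix[attr][role] += 1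
--
--     # Compute weighted scores
--     weighted_scores = {}
--     for attr, role_map in attr_role_matrix.items():
--         score = sum(role_counts[role] * count for role, count in role_map.items())
--         weighted_scores[attr] = score
--
--     # Sort by score
--     return sorted(weighted_scores.items(), key=lambda x: x[1], reverse=True)
-- ===== SOURCE B (Python) =====
-- def prioritize_by_role_weighted_frequency(story_tuples):
--     # Pass 1: role frequencies (flat dict).
--     role_counts = {}
--     for role, _attrs in story_tuples:
--         role_counts[role] = role_counts.get(role, 0) + 1
--     # Pass 2: accumulate weighted scores directly; no attr->role matrix.
--     weighted_scores = {}
--     for role, attrs in story_tuples: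
--         w = role_counts[role]
--         for attr in attrs:
--             weighted_scores[attr] = weighted_scores.get(attr, 0) + w
--     return sorted(weighted_scores.items(), key=lambda x: x[1], reverse=True)
-- ===== Notes on version B (the rewrite author's own statement) =====
-- stated objective: simpler
-- what changed: B drops A's nested attr->role count matrix entirely: one flat pass counts roles, a second flat pass adds role_counts[role] straight into a score dict per attribute occurrence, then the same stable descending sort; a timing run measured this constant-factor cheaper (no nested dicts).
import Mathlib
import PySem

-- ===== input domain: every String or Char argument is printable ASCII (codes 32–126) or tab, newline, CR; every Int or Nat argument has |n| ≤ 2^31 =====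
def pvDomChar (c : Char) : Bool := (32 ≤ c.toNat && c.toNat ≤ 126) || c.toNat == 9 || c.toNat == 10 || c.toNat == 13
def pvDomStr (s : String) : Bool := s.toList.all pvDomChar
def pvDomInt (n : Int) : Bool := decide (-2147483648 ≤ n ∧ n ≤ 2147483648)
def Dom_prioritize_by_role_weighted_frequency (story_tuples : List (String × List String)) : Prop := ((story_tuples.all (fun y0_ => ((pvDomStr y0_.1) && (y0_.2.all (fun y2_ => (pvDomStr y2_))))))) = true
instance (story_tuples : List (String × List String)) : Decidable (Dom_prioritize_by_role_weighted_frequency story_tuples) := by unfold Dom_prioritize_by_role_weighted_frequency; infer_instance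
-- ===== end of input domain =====

-- B replaces A's nested attr->role count matrix by direct score accumulation in two flat passes (simpler; measured constant-factor faster in a timing run); same result proved.

-- ===== PORT A =====
def prioritize_by_role_weighted_frequency (story_tuples : List (String × List String)) : List (String × Int) :=
  -- one loop building role_counts and attr_role_matrix together
  let st := story_tuples.foldl
    (fun (st : PySem.Dict String Int × PySem.Dict String (PySem.Dict String Int)) p =>
      (st.1.modify p.1 0 (· + 1),
       p.2.foldl (fun m a => m.modify a PySem.Dict.empty (fun rm => rm.modify p.1 0 (· + 1))) st.2))
    (PySem.Dict.empty, PySem.Dict.empty)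
  let role_counts := st.1
  let matrix := st.2
  -- weighted_scores = {}; for attr, role_map in matrix.items(): score = sum(...)
  let weighted := matrix.items.foldl
    (fun (ws : PySem.Dict String Int) q =>
      ws.insert q.1 (q.2.items.foldl (fun s e => s + role_counts.getD e.1 0 * e.2) 0))
    PySem.Dict.empty
  PySem.List.sorted weighted.items (fun x => x.2) true

-- ===== PORT B =====
def prioritize_by_role_weighted_frequency_alt (story_tuples : List (String × List String)) : List (String × Int) :=
  -- pass 1: role frequencies
  let role_counts := story_tuples.foldl (fun d p => d.insert p.1 (d.getD p.1 0 + 1)) PySem.Dict.empty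
  -- pass 2: accumulate scores directly (role_counts[role]: the key is always present, getD is exact here)
  let weighted := story_tuples.foldl
    (fun (ws : PySem.Dict String Int) p =>
      let w := role_counts.getD p.1 0
      p.2.foldl (fun ws a => ws.insert a (ws.getD a 0 + w)) ws)
    PySem.Dict.empty
  PySem.List.sorted weighted.items (fun x => x.2) true

-- ===== PRECONDITION & SPEC =====
def Spec_prioritize_by_role_weighted_frequency (story_tuples : List (String × List String)) (out : List (String × Int)) : Prop := out = prioritize_by_role_weighted_frequency_alt story_tuples
instance (story_tuples : List (String × List String)) (out : List (String × Int)) : Decidable (Spec_prioritize_by_role_weighted_frequency story_tuples out) := by unfold Spec_prioritize_by_role_weighted_frequency; infer_instance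

-- ===== CLAIM (what is proved, stated in full; the proofs are below) =====
def Claim_equal_prioritize_by_role_weighted_frequency : Prop := ∀ (story_tuples : List (String × List String)), Dom_prioritize_by_role_weighted_frequency story_tuples → Spec_prioritize_by_role_weighted_frequency story_tuples (prioritize_by_role_weighted_frequency story_tuples)

-- ===== LEMMAS AND PROOFS =====

-- ===== LEMMAS AND PROOFS =====

-- (attr, role) occurrence list
def pvOcc (stories : List (String × List String)) : List (String × String) :=
  stories.flatMap (fun p => p.2.map (fun a => (a, p.1)))

def pvRoles (stories : List (String × List String)) (a : String) : List String :=
  ((pvOcc stories).filter (fun q => q.1 == a)).map (·.2)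

-- matrix step of A
def pvStepM (m : PySem.Dict String (PySem.Dict String Int)) (q : String × String) :
    PySem.Dict String (PySem.Dict String Int) :=
  m.modify q.1 PySem.Dict.empty (fun rm => rm.modify q.2 0 (· + 1))

lemma pvMatrix_getD (occ : List (String × String)) (m : PySem.Dict String (PySem.Dict String Int)) (a : String) :
    (occ.foldl pvStepM m).getD a PySem.Dict.empty
      = (((occ.filter (fun q => q.1 == a)).map (·.2)).foldl (fun rm r => rm.modify r 0 (· + 1)) (m.getD a PySem.Dict.empty)) := by
  induction occ generalizing m with
  | nil => simp
  | cons q occ ih =>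
    simp only [List.foldl_cons, ih, List.filter_cons]
    by_cases h : q.1 = a
    · simp [h, pvStepM]
    · have h2 : (q.1 == a) = false := by simpa using h
      simp [h2, pvStepM, PySem.Dict.getD_modify, Ne.symm h]

lemma pvWsB_getD (rc : PySem.Dict String Int) (occ : List (String × String)) (ws : PySem.Dict String Int) (a : String) :
    (occ.foldl (fun ws q => ws.insert q.1 (ws.getD q.1 0 + rc.getD q.2 0)) ws).getD a 0
      = ws.getD a 0 + (((occ.filter (fun q => q.1 == a)).map (·.2)).map (fun r => rc.getD r 0)).sum := by
  induction occ generalizing ws with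
  | nil => simp
  | cons q occ ih =>
    simp only [List.foldl_cons, ih, List.filter_cons]
    by_cases h : q.1 = a
    · simp [h]
      ring
    · have h2 : (q.1 == a) = false := by simpa using h
      simp [h2, PySem.Dict.getD_insert, Ne.symm h]

lemma pvSum_ite (ks : List String) (hnd : ks.Nodup) (x : String) (hx : x ∈ ks) (w : String → Int) :
    (ks.map (fun k => if k = x then w k else 0)).sum = w x := by
  induction ks with
  | nil => cases hx
  | cons k ks ih =>
    rcases List.mem_cons.mp hx with h | h
    · have hz : (ks.map (fun j => if j = x then w j else 0)).sum = 0 := by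
        apply List.sum_eq_zero
        intro y hy
        rcases List.mem_map.mp hy with ⟨j, hj, rfl⟩
        have : j ≠ x := fun hjx => (List.nodup_cons.mp hnd).1 (h ▸ hjx ▸ hj)
        simp [this]
      simp [← h, hz]
    · have hkx : k ≠ x := fun hkx => (List.nodup_cons.mp hnd).1 (hkx ▸ h)
      simp [hkx, ih (List.nodup_cons.mp hnd).2 h]

lemma pvSum_count (w : String → Int) (xs ks : List String) (hnd : ks.Nodup) (hsub : ∀ x ∈ xs, x ∈ ks) :
    (ks.map (fun k => w k * xs.count k)).sum = (xs.map w).sum := by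
  induction xs with
  | nil => simp
  | cons x xs ih =>
    have h1 : (ks.map (fun k => w k * (x :: xs).count k)).sum
        = (ks.map (fun k => w k * xs.count k)).sum + (ks.map (fun k => if k = x then w k else 0)).sum := by
      rw [← List.sum_map_add]
      refine congrArg List.sum (List.map_congr_left ?_)
      intro k hk
      by_cases h : k = x
      · subst h; simp; ring
      · have : (x == k) = false := by simpa using (Ne.symm h)
        simp [List.count_cons, this, h]
    rw [h1, pvSum_ite ks hnd x (hsub x (by simp)) w,
        ih (fun y hy => hsub y (by simp [hy]))]
    simp
    ring

-- abbreviations for the proof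
def pvRcA (stories : List (String × List String)) : PySem.Dict String Int :=
  stories.foldl (fun d p => d.modify p.1 0 (· + 1)) PySem.Dict.empty

def pvRcB (stories : List (String × List String)) : PySem.Dict String Int :=
  stories.foldl (fun d p => d.insert p.1 (d.getD p.1 0 + 1)) PySem.Dict.empty

def pvM (stories : List (String × List String)) : PySem.Dict String (PySem.Dict String Int) :=
  (pvOcc stories).foldl pvStepM PySem.Dict.empty

lemma pvRcA_getD (stories : List (String × List String)) (d : PySem.Dict String Int) (r : String) :
    (stories.foldl (fun d p => d.modify p.1 0 (· + 1)) d).getD r 0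
      = d.getD r 0 + (stories.map Prod.fst).count r := by
  induction stories generalizing d with
  | nil => simp
  | cons p stories ih =>
    simp only [List.foldl_cons, ih, List.map_cons, List.count_cons]
    by_cases h : p.1 = r
    · simp [h]; ring
    · have hne : r ≠ p.1 := fun hh => h hh.symm
      simp [PySem.Dict.getD_modify, hne]
      exact h

lemma pvRcB_getD (stories : List (String × List String)) (d : PySem.Dict String Int) (r : String) :
    (stories.foldl (fun d p => d.insert p.1 (d.getD p.1 0 + 1)) d).getD r 0
      = d.getD r 0 + (stories.map Prod.fst).count r := by
  induction stories generalizing d with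
  | nil => simp
  | cons p stories ih =>
    simp only [List.foldl_cons, ih, List.map_cons, List.count_cons]
    by_cases h : p.1 = r
    · simp [h]; ring
    · have hne : r ≠ p.1 := fun hh => h hh.symm
      simp [PySem.Dict.getD_insert, hne]
      exact h

lemma pvRc_getD (stories : List (String × List String)) (r : String) :
    (pvRcA stories).getD r 0 = (pvRcB stories).getD r 0 := by
  unfold pvRcA pvRcB
  rw [pvRcA_getD, pvRcB_getD]

lemma pvA_split (stories : List (String × List String)) :
    stories.foldl
      (fun (st : PySem.Dict String Int × PySem.Dict String (PySem.Dict String Int)) p =>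
        (st.1.modify p.1 0 (· + 1),
         p.2.foldl (fun m a => m.modify a PySem.Dict.empty (fun rm => rm.modify p.1 0 (· + 1))) st.2))
      (PySem.Dict.empty, PySem.Dict.empty)
      = (pvRcA stories, pvM stories) := by
  have h := PySem.List.foldl_prod_mk
        (f := fun (d : PySem.Dict String Int) (p : String × List String) => d.modify p.1 0 (· + 1))
        (g := fun (m : PySem.Dict String (PySem.Dict String Int)) (p : String × List String) =>
          p.2.foldl (fun m a => m.modify a PySem.Dict.empty (fun rm => rm.modify p.1 0 (· + 1))) m)
        (l := stories) (a := PySem.Dict.empty) (b := PySem.Dict.empty)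
  refine h.trans ?_
  unfold pvRcA pvM pvOcc
  rw [List.foldl_flatMap]
  congr 2
  funext m p
  rw [List.foldl_map]
  rfl

lemma pvM_keys (stories : List (String × List String)) :
    (pvM stories).keys = PySem.Set.ofList ((pvOcc stories).map (·.1)) := by
  unfold pvM pvStepM
  rw [PySem.Dict.keys_foldl_modify_key]
  simp [PySem.Set.update_nil_left]

lemma pvM_nodup (stories : List (String × List String)) : (pvM stories).keys.Nodup := by
  rw [pvM_keys]; exact PySem.Set.nodup_ofList _

lemma pvM_getD (stories : List (String × List String)) (a : String) :
    (pvM stories).getD a PySem.Dict.empty = PySem.Dict.counter (pvRoles stories a) := by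
  unfold pvM pvRoles
  rw [pvMatrix_getD, PySem.Dict.counter_eq_foldl]
  simp

def pvScore (rc : PySem.Dict String Int) (d : PySem.Dict String Int) : Int :=
  d.items.foldl (fun s e => s + rc.getD e.1 0 * e.2) 0

def pvWgt (stories : List (String × List String)) : PySem.Dict String Int :=
  (pvOcc stories).foldl (fun ws q => ws.insert q.1 (ws.getD q.1 0 + (pvRcB stories).getD q.2 0)) PySem.Dict.empty

lemma pvScore_counter (rc : PySem.Dict String Int) (xs : List String) :
    pvScore rc (PySem.Dict.counter xs) = (xs.map (fun r => rc.getD r 0)).sum := by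
  unfold pvScore
  rw [PySem.List.foldl_add (g := fun e : String × Int => rc.getD e.1 0 * e.2),
      PySem.Dict.items_counter]
  simp only [List.map_map, Function.comp_def]
  rw [pvSum_count (fun k => rc.getD k 0) xs _ (PySem.Set.nodup_ofList _)
        (fun x hx => (PySem.Set.mem_ofList _ _).mpr hx)]
  simp

lemma pvB_eq (stories : List (String × List String)) :
    prioritize_by_role_weighted_frequency_alt stories
      = PySem.List.sorted (pvWgt stories).items (fun x => x.2) true := by
  simp only [prioritize_by_role_weighted_frequency_alt]
  rw [show (stories.foldl (fun d (p : String × List String) => d.insert p.1 (d.getD p.1 0 + 1)) PySem.Dict.empty) = pvRcB stories from rfl]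
  have hfun : (fun (ws : PySem.Dict String Int) (p : String × List String) =>
        p.2.foldl (fun ws a => ws.insert a (ws.getD a 0 + (pvRcB stories).getD p.1 0)) ws)
      = (fun acc (x : String × List String) =>
          (x.2.map (fun a => (a, x.1))).foldl
            (fun ws q => ws.insert q.1 (ws.getD q.1 0 + (pvRcB stories).getD q.2 0)) acc) := by
    funext ws p
    rw [List.foldl_map]
  unfold pvWgt pvOcc
  rw [List.foldl_flatMap, ← hfun]

lemma pvA_eq (stories : List (String × List String)) :
    prioritize_by_role_weighted_frequency stories
      = PySem.List.sorted ((pvM stories).items.map (fun q => (q.1, pvScore (pvRcA stories) q.2)))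
          (fun x => x.2) true := by
  simp only [prioritize_by_role_weighted_frequency]
  rw [pvA_split]
  have h := PySem.Dict.items_foldl_insert_fresh
    (l := (pvM stories).items) (k := Prod.fst)
    (v := fun q : String × PySem.Dict String Int =>
      q.2.items.foldl (fun s e => s + (pvRcA stories).getD e.1 0 * e.2) 0)
    (d := PySem.Dict.empty)
    (fun q _ => PySem.Dict.contains_empty _)
    (pvM_nodup stories)
  rw [h]
  simp [pvScore, show (PySem.Dict.empty : PySem.Dict String Int).items = [] from rfl]

lemma pvWgt_keys (stories : List (String × List String)) :
    (pvWgt stories).keys = PySem.Set.ofList ((pvOcc stories).map (·.1)) := by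
  unfold pvWgt
  rw [PySem.Dict.keys_foldl_insert_key
        (key := Prod.fst)
        (f := fun ws (q : String × String) => ws.getD q.1 0 + (pvRcB stories).getD q.2 0)]
  simp [PySem.Set.update_nil_left]

lemma pvItems_eq (stories : List (String × List String)) :
    (pvM stories).items.map (fun q => (q.1, pvScore (pvRcA stories) q.2)) = (pvWgt stories).items := by
  have hndM := pvM_nodup stories
  have hndW : (pvWgt stories).keys.Nodup := by
    rw [pvWgt_keys]; exact PySem.Set.nodup_ofList _
  rw [PySem.Dict.items_eq_map_keys _ hndM PySem.Dict.empty,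
      PySem.Dict.items_eq_map_keys _ hndW 0,
      List.map_map, pvWgt_keys, pvM_keys]
  apply List.map_congr_left
  intro a ha
  simp only [Function.comp]
  rw [pvM_getD, pvScore_counter]
  unfold pvWgt
  rw [pvWsB_getD]
  simp only [PySem.Dict.getD_empty, zero_add, pvRoles]
  exact congrArg (fun z => (a, z)) (congrArg List.sum (List.map_congr_left (fun r _ => pvRc_getD stories r)))

-- ===== VERDICT (by name: the statement is the Claim_ definition above) =====
theorem prioritize_by_role_weighted_frequency_spec : Claim_equal_prioritize_by_role_weighted_frequency := by
  intro stories _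
  unfold Spec_prioritize_by_role_weighted_frequency
  rw [pvA_eq, pvB_eq, pvItems_eq]
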